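-- pv_equiv track=rewrite | github.com/marynavek/Computer_Vision | HW_3_Decision_functions/main_2.py | clean_up_combinations
-- ===== SOURCE A (Python) =====
-- def clean_up_combinations(initial_combinations):
--     final_combinations = []
--     for combinations in initial_combinations:
--         for combination in combinations:
--             if combination not in final_combinations:
--                 final_combinations.append(combination)
--     final_combinations.sort()
--     return final_combinations
-- ===== SOURCE B (Python) =====
-- def clean_up_combinations(initial_combinations):
--     # Flatten keeping duplicates, sort once, then drop adjacent duplicates in one pass.
--     flat = []
--     for combinations in initial_combinations:
--         flat.extend(combinations)
--     flat.sort()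
--     result = []
--     for x in flat:
--         if not result or result[-1] != x:
--             result.append(x)
--     return result
-- ===== Notes on version B (the rewrite author's own statement) =====
-- stated objective: faster
-- what changed: Replaces the quadratic membership-scan dedup (each element searched in the growing result list) by flatten + sort + one linear pass dropping adjacent duplicates.
import Mathlib
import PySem

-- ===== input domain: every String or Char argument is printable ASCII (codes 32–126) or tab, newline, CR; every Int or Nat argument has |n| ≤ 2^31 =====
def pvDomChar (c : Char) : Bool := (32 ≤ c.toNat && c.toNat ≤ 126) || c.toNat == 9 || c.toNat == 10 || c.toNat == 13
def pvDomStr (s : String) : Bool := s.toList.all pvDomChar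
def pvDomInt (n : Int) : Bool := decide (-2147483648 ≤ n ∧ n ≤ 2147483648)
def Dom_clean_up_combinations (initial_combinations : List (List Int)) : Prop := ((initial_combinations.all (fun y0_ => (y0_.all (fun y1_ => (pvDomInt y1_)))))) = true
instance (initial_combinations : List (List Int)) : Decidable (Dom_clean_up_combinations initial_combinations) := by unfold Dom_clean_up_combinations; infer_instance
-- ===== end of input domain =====

-- B replaces A's quadratic membership-scan dedup by flatten + sort + one pass dropping adjacent duplicates.

-- ===== PORT A =====
def clean_up_combinations (initial_combinations : List (List Int)) : List Int :=
  let final_combinations :=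
    initial_combinations.foldl
      (fun fc combinations =>
        combinations.foldl (fun fc combination =>
          if combination ∈ fc then fc else fc ++ [combination]) fc)
      []
  PySem.List.sorted final_combinations (fun x => x) false

-- ===== PORT B =====
def clean_up_combinations_alt (initial_combinations : List (List Int)) : List Int :=
  let flat := initial_combinations.foldl (fun acc combinations => acc ++ combinations) []
  let s := PySem.List.sorted flat (fun x => x) false
  s.foldl (fun result x => if result.getLast? = some x then result else result ++ [x]) []

-- ===== PRECONDITION & SPEC =====
def Spec_clean_up_combinations (initial_combinations : List (List Int)) (out : List Int) : Prop := out = clean_up_combinations_alt initial_combinations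
instance (initial_combinations : List (List Int)) (out : List Int) : Decidable (Spec_clean_up_combinations initial_combinations out) := by unfold Spec_clean_up_combinations; infer_instance

-- ===== CLAIM (what is proved, stated in full; the proofs are below) =====
def Claim_equal_clean_up_combinations : Prop := ∀ (initial_combinations : List (List Int)), Dom_clean_up_combinations initial_combinations → Spec_clean_up_combinations initial_combinations (clean_up_combinations initial_combinations)

-- ===== LEMMAS AND PROOFS =====

-- A's nested loop is the first-occurrence dedup of the flattened list, i.e. PySem.Set.ofList.
theorem a_inner_eq_update (l : List Int) :
    ∀ acc : List Int,
      l.foldl (fun fc c => if c ∈ fc then fc else fc ++ [c]) acc = PySem.Set.update acc l := by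
  induction l with
  | nil => intro acc; rfl
  | cons a t ih =>
      intro acc
      have hstep : (if a ∈ acc then acc else acc ++ [a]) = PySem.Set.add acc a := by
        simp [PySem.Set.add, PySem.Set.contains]
      simp [List.foldl_cons, PySem.Set.update, hstep, ih (PySem.Set.add acc a)]

theorem a_fold_eq_ofList (xss : List (List Int)) :
    ∀ acc : List Int,
      xss.foldl (fun fc cs => cs.foldl (fun fc c => if c ∈ fc then fc else fc ++ [c]) fc) acc
        = PySem.Set.update acc xss.flatten := by
  induction xss with
  | nil => intro acc; rfl
  | cons cs t ih =>
      intro acc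
      rw [List.foldl_cons, a_inner_eq_update, ih]
      simp [PySem.Set.update, List.foldl_append]

theorem b_flat_eq_flatten (xss : List (List Int)) :
    ∀ acc : List Int, xss.foldl (fun acc cs => acc ++ cs) acc = acc ++ xss.flatten := by
  induction xss with
  | nil => intro acc; simp
  | cons cs t ih => intro acc; simp [List.foldl_cons, ih]

-- In a strictly increasing list every element is ≤ the last one.
theorem pairwise_lt_le_getLast (acc : List Int) (p : Int)
    (hpw : acc.Pairwise (· < ·)) (hl : acc.getLast? = some p) : ∀ x ∈ acc, x ≤ p := by
  induction acc with
  | nil => simp at hl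
  | cons a t ih =>
      intro x hx
      rcases List.pairwise_cons.mp hpw with ⟨ha, hpt⟩
      cases t with
      | nil =>
          simp at hl hx; omega
      | cons b u =>
          have hl' : (b :: u).getLast? = some p := by
            simpa [List.getLast?_cons_cons] using hl
          rcases List.mem_cons.mp hx with hx | hx
          · subst hx
            have : p ∈ b :: u := List.mem_of_getLast? hl'
            exact le_of_lt (ha p this)
          · exact ih hpt hl' x hx

-- membership through the adjacent-dedup fold
theorem adj_mem (l : List Int) :
    ∀ (acc : List Int) (x : Int),
      x ∈ l.foldl (fun res y => if res.getLast? = some y then res else res ++ [y]) acc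
        ↔ x ∈ acc ∨ x ∈ l := by
  induction l with
  | nil => intro acc x; simp
  | cons a t ih =>
      intro acc x
      by_cases h : acc.getLast? = some a
      · have ha : a ∈ acc := List.mem_of_getLast? h
        rw [List.foldl_cons, if_pos h, ih]
        simp only [List.mem_cons]
        constructor
        · rintro (hx | hx)
          · exact Or.inl hx
          · exact Or.inr (Or.inr hx)
        · rintro (hx | rfl | hx)
          · exact Or.inl hx
          · exact Or.inl ha
          · exact Or.inr hx
      · simp [List.foldl_cons, h, ih, List.mem_append, or_assoc]

-- the adjacent-dedup fold of a ≤-sorted list is strictly increasing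
theorem adj_pairwise (l : List Int) :
    ∀ acc : List Int, l.Pairwise (· ≤ ·) → acc.Pairwise (· < ·) →
      (∀ p, acc.getLast? = some p → ∀ b ∈ l, p ≤ b) →
      (l.foldl (fun res y => if res.getLast? = some y then res else res ++ [y]) acc).Pairwise (· < ·) := by
  induction l with
  | nil => intro acc _ hacc _; simpa using hacc
  | cons a t ih =>
      intro acc hl hacc hlast
      rcases List.pairwise_cons.mp hl with ⟨hat, ht⟩
      by_cases h : acc.getLast? = some a
      · rw [List.foldl_cons, if_pos h]
        refine ih acc ht hacc ?_
        intro p hp b hb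
        rw [h] at hp
        exact (Option.some.inj hp) ▸ hat b hb
      · rw [List.foldl_cons, if_neg h]
        refine ih (acc ++ [a]) ht ?_ ?_
        · rw [List.pairwise_append]
          refine ⟨hacc, by simp, ?_⟩
          intro x hx y hy
          have hy' : y = a := by simpa using hy
          cases hacc' : acc.getLast? with
          | none =>
              rw [List.getLast?_eq_none_iff] at hacc'
              simp [hacc'] at hx
          | some p =>
              have hxp : x ≤ p := pairwise_lt_le_getLast acc p hacc hacc' x hx
              have hpa : p ≤ a := hlast p hacc' a (by simp)
              have hpna : p ≠ a := fun hpe => h (hpe ▸ hacc')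
              omega
        · intro p hp b hb
          rw [List.getLast?_concat] at hp
          exact (Option.some.inj hp) ▸ hat b hb

-- ===== VERDICT (by name: the statement is the Claim_ definition above) =====
theorem clean_up_combinations_spec : Claim_equal_clean_up_combinations := by
  intro xss _
  unfold Spec_clean_up_combinations clean_up_combinations clean_up_combinations_alt
  rw [a_fold_eq_ofList, b_flat_eq_flatten]
  simp only [List.nil_append]
  have hupd : PySem.Set.update ([] : List Int) xss.flatten = PySem.Set.ofList xss.flatten := rfl
  rw [hupd]
  set flat := xss.flatten with hflat
  set ys := (PySem.List.sorted flat (fun x => x) false).foldl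
      (fun res y => if res.getLast? = some y then res else res ++ [y]) [] with hys
  have hsorted_pw : (PySem.List.sorted flat (fun x => x) false).Pairwise (· ≤ ·) := by
    simpa using PySem.List.sorted_pairwise (xs := flat) (key := fun x => x)
  have hys_pw : ys.Pairwise (· < ·) := by
    refine adj_pairwise _ [] hsorted_pw (by simp) (by simp)
  have hys_nodup : ys.Nodup := hys_pw.imp (fun h => ne_of_lt h)
  have hys_mem : ∀ x, x ∈ ys ↔ x ∈ PySem.Set.ofList flat := by
    intro x
    rw [hys, adj_mem]
    simp [PySem.List.mem_sorted, PySem.Set.mem_ofList]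
  have hperm : ys.Perm (PySem.Set.ofList flat) :=
    (List.perm_ext_iff_of_nodup hys_nodup (PySem.Set.nodup_ofList (xs := flat))).mpr hys_mem
  exact PySem.List.sorted_eq_of_perm_of_pairwise_lt _ _ (fun x => x) hperm (by simpa using hys_pw)
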